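-- pv_equiv track=rewrite | github.com/vriken/aoc2023 | day2.py | is_game_possible
-- ===== SOURCE A (Python) =====
-- def is_game_possible(game_record, red_limit, green_limit, blue_limit):
--     subsets = game_record.strip().split('; ')
--     for subset in subsets:
--         red_count = sum(int(num.split()[0]) for num in subset.split(',') if 'red' in num)
--         green_count = sum(int(num.split()[0]) for num in subset.split(',') if 'green' in num)
--         blue_count = sum(int(num.split()[0]) for num in subset.split(',') if 'blue' in num)
--
--         if red_count > red_limit or green_count > green_limit or blue_count > blue_limit:
--             return False
--     return True
-- ===== SOURCE B (Python) =====
-- def is_game_possible(game_record, red_limit, green_limit, blue_limit):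
--     subsets = [s.split(',') for s in game_record.strip().split('; ')]
--
--     def needed(color):
--         return max(sum(int(t.split()[0]) for t in toks if color in t) for toks in subsets)
--
--     return needed('red') <= red_limit and needed('green') <= green_limit and needed('blue') <= blue_limit
-- ===== Notes on version B (the rewrite author's own statement) =====
-- stated objective: alternative
-- what changed: B inverts the decomposition: instead of A's per-subset early-return loop checking three colors each, B computes for each color the maximum cube count needed across all subsets (AoC part-2 style) and compares the three maxima to the limits once at the end.
-- outside the precondition, e.g. on is_game_possible('2 red; x red', 1, 1, 1): A returns False, B raises ValueError
import Mathlib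
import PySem

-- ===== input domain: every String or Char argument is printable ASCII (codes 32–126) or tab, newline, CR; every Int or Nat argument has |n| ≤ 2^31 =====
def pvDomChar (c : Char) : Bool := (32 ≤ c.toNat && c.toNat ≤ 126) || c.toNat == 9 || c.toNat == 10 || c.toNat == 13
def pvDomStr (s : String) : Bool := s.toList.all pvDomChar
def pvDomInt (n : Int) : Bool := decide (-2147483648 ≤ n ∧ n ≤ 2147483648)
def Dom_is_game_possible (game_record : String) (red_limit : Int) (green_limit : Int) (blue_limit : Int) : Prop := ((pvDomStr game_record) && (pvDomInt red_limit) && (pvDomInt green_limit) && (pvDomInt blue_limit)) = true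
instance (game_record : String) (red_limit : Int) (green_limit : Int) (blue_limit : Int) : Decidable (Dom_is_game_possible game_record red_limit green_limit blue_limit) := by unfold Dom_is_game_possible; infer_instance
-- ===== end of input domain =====

-- B inverts the decomposition: it computes the per-color maximum count needed over all subsets and compares the three maxima to the limits once, instead of A's per-subset early-return check (alternative, same results on Pre_).


-- ===== PORT A =====
-- s.split(sep) for a nonempty literal sep: split? is some there, the default is unreachable
def pvSplit (s sep : String) : List String := (PySem.Str.split? s sep).getD []

-- int(num.split()[0]); total stand-in: outside Pre_ (parse failure / empty split) it yields 0
def pvTokVal (t : String) : Int :=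
  ((PySem.Str.split₀ t).headD "" |> PySem.Int.ofStr?).getD 0

-- the per-subset early-return loop of A
def pvALoop (subsets : List String) (red_limit green_limit blue_limit : Int) : Bool :=
  match subsets with
  | [] => true
  | subset :: rest =>
      let toks := pvSplit subset ","
      let red_count := ((toks.filter (fun t => PySem.Str.isIn "red" t)).map pvTokVal).sum
      let green_count := ((toks.filter (fun t => PySem.Str.isIn "green" t)).map pvTokVal).sum
      let blue_count := ((toks.filter (fun t => PySem.Str.isIn "blue" t)).map pvTokVal).sum
      if red_count > red_limit || green_count > green_limit || blue_count > blue_limit then false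
      else pvALoop rest red_limit green_limit blue_limit

def is_game_possible (game_record : String) (red_limit : Int) (green_limit : Int) (blue_limit : Int) : Bool :=
  pvALoop (pvSplit (PySem.Str.strip game_record) "; ") red_limit green_limit blue_limit

-- ===== PORT B =====
-- sum(int(t.split()[0]) for t in toks if color in t)
def pvColorSum (toks : List String) (color : String) : Int :=
  ((toks.filter (fun t => PySem.Str.isIn color t)).map pvTokVal).sum

-- needed(color) = max(<color sum of each subset> for toks in subsets); Python max raises on an
-- empty sequence — unreachable here since split always yields at least one subset (getD 0 is dead)
def pvNeeded (subsets : List (List String)) (color : String) : Int :=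
  (PySem.List.max? (subsets.map (fun toks => pvColorSum toks color)) (fun x => x)).getD 0

def is_game_possible_alt (game_record : String) (red_limit : Int) (green_limit : Int) (blue_limit : Int) : Bool :=
  let subsets := (pvSplit (PySem.Str.strip game_record) "; ").map (fun s => pvSplit s ",")
  decide (pvNeeded subsets "red" ≤ red_limit) &&
  decide (pvNeeded subsets "green" ≤ green_limit) &&
  decide (pvNeeded subsets "blue" ≤ blue_limit)

-- ===== PRECONDITION & SPEC =====
-- Pre_ excludes the inputs where int(num.split()[0]) raises (ValueError/IndexError) on a color-matching
-- token in ANY subset: A may still return False before reaching a later malformed subset (where B,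
-- which scans all subsets, raises instead) — such inputs are excluded, see the cite in claim.json.
def Pre_is_game_possible (game_record : String) (red_limit : Int) (green_limit : Int) (blue_limit : Int) : Prop :=
  ∀ s ∈ pvSplit (PySem.Str.strip game_record) "; ",
    ∀ t ∈ pvSplit s ",",
      (PySem.Str.isIn "red" t || PySem.Str.isIn "green" t || PySem.Str.isIn "blue" t) = true →
        (((PySem.Str.split₀ t).head?.bind PySem.Int.ofStr?).isSome = true)
instance (game_record : String) (red_limit : Int) (green_limit : Int) (blue_limit : Int) : Decidable (Pre_is_game_possible game_record red_limit green_limit blue_limit) := by unfold Pre_is_game_possible; infer_instance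

def pvWitness_is_game_possible : String × Int × Int × Int := ("3 red, 4 blue; 1 green", 10, 10, 10)

def Spec_is_game_possible (game_record : String) (red_limit : Int) (green_limit : Int) (blue_limit : Int) (out : Bool) : Prop := out = is_game_possible_alt game_record red_limit green_limit blue_limit
instance (game_record : String) (red_limit : Int) (green_limit : Int) (blue_limit : Int) (out : Bool) : Decidable (Spec_is_game_possible game_record red_limit green_limit blue_limit out) := by unfold Spec_is_game_possible; infer_instance

-- ===== CLAIM (what is proved, stated in full; the proofs are below) =====
def Claim_equal_is_game_possible : Prop := ∀ (game_record : String) (red_limit : Int) (green_limit : Int) (blue_limit : Int), Dom_is_game_possible game_record red_limit green_limit blue_limit → Pre_is_game_possible game_record red_limit green_limit blue_limit → Spec_is_game_possible game_record red_limit green_limit blue_limit (is_game_possible game_record red_limit green_limit blue_limit)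

-- ===== LEMMAS AND PROOFS =====
-- A's loop returns true iff every subset is within all three limits
theorem pvALoop_eq_true_iff (subsets : List String) (rl gl bl : Int) :
    pvALoop subsets rl gl bl = true ↔
      ∀ s ∈ subsets, pvColorSum (pvSplit s ",") "red" ≤ rl ∧
                     pvColorSum (pvSplit s ",") "green" ≤ gl ∧
                     pvColorSum (pvSplit s ",") "blue" ≤ bl := by
  induction subsets with
  | nil => simp [pvALoop]
  | cons s rest ih =>
    simp only [pvALoop, pvColorSum, List.mem_cons]
    split_ifs with h
    · simp only [gt_iff_lt, Bool.or_eq_true, decide_eq_true_eq] at h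
      simp only [false_iff]
      intro hall
      rcases hall s (Or.inl rfl) with ⟨h1, h2, h3⟩
      omega
    · simp only [gt_iff_lt, Bool.or_eq_true, decide_eq_true_eq, not_or, not_lt] at h
      rw [ih]
      constructor
      · intro hall x hx
        rcases hx with rfl | hx
        · refine ⟨?_, ?_, ?_⟩ <;> omega
        · exact hall x hx
      · intro hall x hx; exact hall x (Or.inr hx)

-- the max of a nonempty list is ≤ c iff every element is
theorem pvMax_le_iff (l : List Int) (hl : l ≠ []) (c : Int) :
    ((PySem.List.max? l (fun x => x)).getD 0 ≤ c) ↔ ∀ x ∈ l, x ≤ c := by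
  rcases hm : PySem.List.max? l (fun x => x) with _ | m
  · exact absurd ((PySem.List.max?_eq_none_iff l (fun x => x)).mp hm) hl
  · simp only [Option.getD_some]
    constructor
    · intro h x hx
      exact le_trans (PySem.List.max?_isMax hm x hx) h
    · intro h
      exact h m (PySem.List.max?_mem hm)

-- splitOn.go always ends by reversing a cons, so its result is never empty
theorem pvSplitOnGo_ne_nil (sep : List Char) (fuel : Nat) (l cur : List Char)
    (acc : List (List Char)) : PySem.Chars.splitOn.go sep fuel l cur acc ≠ [] := by
  induction fuel generalizing l cur acc with
  | zero => simp [PySem.Chars.splitOn.go]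
  | succ n ih =>
    cases l with
    | nil => simp [PySem.Chars.splitOn.go]
    | cons c rest =>
      simp only [PySem.Chars.splitOn.go]
      split_ifs <;> apply ih

-- game_record.strip().split('; ') is never empty
theorem pvSplit_ne_nil (s : String) : pvSplit s "; " ≠ [] := by
  simp [pvSplit, PySem.Str.split?, PySem.Chars.split?, PySem.Chars.splitOn,
    pvSplitOnGo_ne_nil]

-- B returns true iff every subset is within all three limits
theorem pvAlt_eq_true_iff (game_record : String) (rl gl bl : Int) :
    is_game_possible_alt game_record rl gl bl = true ↔
      ∀ s ∈ pvSplit (PySem.Str.strip game_record) "; ",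
        pvColorSum (pvSplit s ",") "red" ≤ rl ∧
        pvColorSum (pvSplit s ",") "green" ≤ gl ∧
        pvColorSum (pvSplit s ",") "blue" ≤ bl := by
  have hne : pvSplit (PySem.Str.strip game_record) "; " ≠ [] := pvSplit_ne_nil _
  have hmapne : ∀ (c : String),
      ((pvSplit (PySem.Str.strip game_record) "; ").map (fun s => pvSplit s ",")).map
        (fun toks => pvColorSum toks c) ≠ [] := by
    intro c; simp [hne]
  simp only [is_game_possible_alt, pvNeeded, Bool.and_eq_true, decide_eq_true_eq,
    pvMax_le_iff _ (hmapne _)]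
  constructor
  · rintro ⟨⟨hr, hg⟩, hb⟩ s hs
    exact ⟨hr _ (List.mem_map_of_mem (List.mem_map_of_mem hs)),
           hg _ (List.mem_map_of_mem (List.mem_map_of_mem hs)),
           hb _ (List.mem_map_of_mem (List.mem_map_of_mem hs))⟩
  · intro h
    refine ⟨⟨?_, ?_⟩, ?_⟩ <;>
    · intro x hx
      simp only [List.mem_map] at hx
      obtain ⟨toks, ⟨s, hs, rfl⟩, rfl⟩ := hx
      rcases h s hs with ⟨h1, h2, h3⟩
      first | exact h1 | exact h2 | exact h3

-- ===== VERDICT (by name: the statement is the Claim_ definition above) =====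
theorem is_game_possible_spec : Claim_equal_is_game_possible := by
  intro game_record rl gl bl _ _
  unfold Spec_is_game_possible is_game_possible
  rw [Bool.eq_iff_iff, pvALoop_eq_true_iff, pvAlt_eq_true_iff]
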